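-- pv_equiv track=rewrite | github.com/abigailhaddad/hearings | scripts/parse_youtube_html.py | categorize_videos
-- ===== SOURCE A (Python) =====
-- def categorize_videos(videos):
--     """Categorize videos based on their titles"""
--
--     categories = {
--         'hearings': [],
--         'markups': [],
--         'opening_statements': [],
--         'press_conferences': [],
--         'field_hearings': [],
--         'member_days': [],
--         'roundtables': [],
--         'other': []
--     }
--
--     for video in videos:
--         title_lower = video['title'].lower() if video.get('title') else ''
--
--         if 'opening statement' in title_lower:
--             categories['opening_statements'].append(video)
--         elif 'field hearing' in title_lower:
--             categories['field_hearings'].append(video)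
--         elif 'press conference' in title_lower or 'news conference' in title_lower:
--             categories['press_conferences'].append(video)
--         elif 'member day' in title_lower:
--             categories['member_days'].append(video)
--         elif 'roundtable' in title_lower:
--             categories['roundtables'].append(video)
--         elif 'markup' in title_lower:
--             categories['markups'].append(video)
--         elif 'hearing' in title_lower or 'oversight' in title_lower or 'examining' in title_lower or 'review' in title_lower:
--             categories['hearings'].append(video)
--         else:
--             categories['other'].append(video)
--
--     return categories
-- ===== SOURCE B (Python) =====
-- _RULES = [
--     ("opening_statements", ["opening statement"]),
--     ("field_hearings", ["field hearing"]),
--     ("press_conferences", ["press conference", "news conference"]),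
--     ("member_days", ["member day"]),
--     ("roundtables", ["roundtable"]),
--     ("markups", ["markup"]),
--     ("hearings", ["hearing", "oversight", "examining", "review"]),
-- ]
--
-- _ORDER = ["hearings", "markups", "opening_statements", "press_conferences",
--           "field_hearings", "member_days", "roundtables", "other"]
--
--
-- def _category(video):
--     """First-match category of one video over the priority rule table."""
--     title = video.get("title")
--     t = title.lower() if title else ""
--     for name, keywords in _RULES:
--         if any(k in t for k in keywords):
--             return name
--     return "other"
--
--
-- def categorize_videos(videos):
--     """Categorize videos based on their titles"""
--     return {cat: [v for v in videos if _category(v) == cat] for cat in _ORDER}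
-- ===== Notes on version B (the rewrite author's own statement) =====
-- stated objective: idiomatic
-- what changed: Replaces the single-pass elif chain that mutates an 8-key dict with a priority rule table plus a first-match classifier, building the result as a dict comprehension that filters the video list once per category.
import Mathlib
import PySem

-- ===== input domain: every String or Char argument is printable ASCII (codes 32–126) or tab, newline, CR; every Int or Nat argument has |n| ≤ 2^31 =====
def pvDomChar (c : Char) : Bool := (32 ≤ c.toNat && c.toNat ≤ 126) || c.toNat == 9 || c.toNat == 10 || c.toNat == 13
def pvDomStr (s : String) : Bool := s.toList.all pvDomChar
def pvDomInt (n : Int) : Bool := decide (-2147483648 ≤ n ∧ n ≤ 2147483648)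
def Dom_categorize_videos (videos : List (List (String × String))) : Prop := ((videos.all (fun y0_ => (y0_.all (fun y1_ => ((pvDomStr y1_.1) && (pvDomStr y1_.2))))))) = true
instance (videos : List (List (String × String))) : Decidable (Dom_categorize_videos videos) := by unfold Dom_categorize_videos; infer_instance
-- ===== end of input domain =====

-- B replaces A's single-pass elif chain with a rule table + first-match classifier and one filter per category (idiomatic; same O(n)).

-- ===== PORT A =====
-- title_lower = video['title'].lower() if video.get('title') else ''
def pvTitleLowerA (video : List (String × String)) : String :=
  match (PySem.Dict.mk video).get? "title" with
  | some t => if t = "" then "" else PySem.Str.lower t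
  | none => ""

def pvStepA (cats : PySem.Dict String (List (List (String × String)))) (video : List (String × String)) :
    PySem.Dict String (List (List (String × String))) :=
  let tl := pvTitleLowerA video
  if PySem.Str.isIn "opening statement" tl then cats.modify "opening_statements" [] (· ++ [video])
  else if PySem.Str.isIn "field hearing" tl then cats.modify "field_hearings" [] (· ++ [video])
  else if PySem.Str.isIn "press conference" tl || PySem.Str.isIn "news conference" tl then cats.modify "press_conferences" [] (· ++ [video])
  else if PySem.Str.isIn "member day" tl then cats.modify "member_days" [] (· ++ [video])
  else if PySem.Str.isIn "roundtable" tl then cats.modify "roundtables" [] (· ++ [video])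
  else if PySem.Str.isIn "markup" tl then cats.modify "markups" [] (· ++ [video])
  else if PySem.Str.isIn "hearing" tl || PySem.Str.isIn "oversight" tl || PySem.Str.isIn "examining" tl || PySem.Str.isIn "review" tl then cats.modify "hearings" [] (· ++ [video])
  else cats.modify "other" [] (· ++ [video])

def categorize_videos (videos : List (List (String × String))) : List (String × List (List (String × String))) :=
  (videos.foldl pvStepA (PySem.Dict.mk
    [("hearings", []), ("markups", []), ("opening_statements", []), ("press_conferences", []),
     ("field_hearings", []), ("member_days", []), ("roundtables", []), ("other", [])])).items

-- ===== PORT B =====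
def pvRules : List (String × List String) :=
  [("opening_statements", ["opening statement"]),
   ("field_hearings", ["field hearing"]),
   ("press_conferences", ["press conference", "news conference"]),
   ("member_days", ["member day"]),
   ("roundtables", ["roundtable"]),
   ("markups", ["markup"]),
   ("hearings", ["hearing", "oversight", "examining", "review"])]

def pvOrder : List String :=
  ["hearings", "markups", "opening_statements", "press_conferences",
   "field_hearings", "member_days", "roundtables", "other"]

def pvFirstMatch : List (String × List String) → String → String
  | [], _ => "other"
  | (name, kws) :: rest, t => if kws.any (fun k => PySem.Str.isIn k t) then name else pvFirstMatch rest t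

def pvCategory (video : List (String × String)) : String :=
  let t :=
    match (PySem.Dict.mk video).get? "title" with
    | some s => if s = "" then "" else PySem.Str.lower s
    | none => ""
  pvFirstMatch pvRules t

def categorize_videos_alt (videos : List (List (String × String))) : List (String × List (List (String × String))) :=
  pvOrder.map (fun c => (c, videos.filter (fun v => pvCategory v == c)))

-- ===== PRECONDITION & SPEC =====
def Spec_categorize_videos (videos : List (List (String × String))) (out : List (String × List (List (String × String)))) : Prop := out = categorize_videos_alt videos
instance (videos : List (List (String × String))) (out : List (String × List (List (String × String)))) : Decidable (Spec_categorize_videos videos out) := by unfold Spec_categorize_videos; infer_instance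

-- ===== CLAIM (what is proved, stated in full; the proofs are below) =====
def Claim_equal_categorize_videos : Prop := ∀ (videos : List (List (String × String))), Dom_categorize_videos videos → Spec_categorize_videos videos (categorize_videos videos)

-- ===== LEMMAS AND PROOFS =====

-- one loop step of A updates exactly the entry that B's classifier names
lemma pvStepA_eq (g : String → List (List (String × String))) (v : List (String × String)) :
    pvStepA (PySem.Dict.mk (pvOrder.map (fun c => (c, g c)))) v
      = PySem.Dict.mk (pvOrder.map (fun c => (c, if pvCategory v == c then g c ++ [v] else g c))) := by
  have htl : pvCategory v = pvFirstMatch pvRules (pvTitleLowerA v) := by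
    simp [pvCategory, pvTitleLowerA]
  simp only [pvStepA, htl]
  generalize pvTitleLowerA v = t
  clear htl
  split_ifs with h1 h2 h3 h4 h5 h6 h7
  · have hc : pvFirstMatch pvRules t = "opening_statements" := by
      simp_all [pvFirstMatch, pvRules]
    rw [hc]
    simp [pvOrder, PySem.Dict.modify, PySem.Dict.insert, PySem.Dict.getD,
      PySem.Dict.get?, PySem.Dict.contains]
  · have hc : pvFirstMatch pvRules t = "field_hearings" := by
      simp_all [pvFirstMatch, pvRules]
    rw [hc]
    simp [pvOrder, PySem.Dict.modify, PySem.Dict.insert, PySem.Dict.getD,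
      PySem.Dict.get?, PySem.Dict.contains]
  · have hc : pvFirstMatch pvRules t = "press_conferences" := by
      rw [Bool.or_eq_true] at h3
      rcases h3 with h3 | h3 <;> simp_all [pvFirstMatch, pvRules]
    rw [hc]
    simp [pvOrder, PySem.Dict.modify, PySem.Dict.insert, PySem.Dict.getD,
      PySem.Dict.get?, PySem.Dict.contains]
  · have hc : pvFirstMatch pvRules t = "member_days" := by
      simp_all [pvFirstMatch, pvRules]
    rw [hc]
    simp [pvOrder, PySem.Dict.modify, PySem.Dict.insert, PySem.Dict.getD,
      PySem.Dict.get?, PySem.Dict.contains]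
  · have hc : pvFirstMatch pvRules t = "roundtables" := by
      simp_all [pvFirstMatch, pvRules]
    rw [hc]
    simp [pvOrder, PySem.Dict.modify, PySem.Dict.insert, PySem.Dict.getD,
      PySem.Dict.get?, PySem.Dict.contains]
  · have hc : pvFirstMatch pvRules t = "markups" := by
      simp_all [pvFirstMatch, pvRules]
    rw [hc]
    simp [pvOrder, PySem.Dict.modify, PySem.Dict.insert, PySem.Dict.getD,
      PySem.Dict.get?, PySem.Dict.contains]
  · have hc : pvFirstMatch pvRules t = "hearings" := by
      simp only [Bool.or_eq_true] at h7
      rcases h7 with ((h7 | h7) | h7) | h7 <;> simp_all [pvFirstMatch, pvRules]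
    rw [hc]
    simp [pvOrder, PySem.Dict.modify, PySem.Dict.insert, PySem.Dict.getD,
      PySem.Dict.get?, PySem.Dict.contains]
  · have hc : pvFirstMatch pvRules t = "other" := by
      simp_all [pvFirstMatch, pvRules]
    rw [hc]
    simp [pvOrder, PySem.Dict.modify, PySem.Dict.insert, PySem.Dict.getD,
      PySem.Dict.get?, PySem.Dict.contains]

lemma pvFold_inv (videos : List (List (String × String))) :
    ∀ g : String → List (List (String × String)),
    videos.foldl pvStepA (PySem.Dict.mk (pvOrder.map (fun c => (c, g c))))
      = PySem.Dict.mk (pvOrder.map (fun c => (c, g c ++ videos.filter (fun v => pvCategory v == c)))) := by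
  induction videos with
  | nil => intro g; simp
  | cons v vs ih =>
    intro g
    rw [List.foldl_cons, pvStepA_eq g v,
        ih (fun c => if pvCategory v == c then g c ++ [v] else g c)]
    congr 1
    apply List.map_congr_left
    intro c _
    cases h : pvCategory v == c <;>
      simp [h]

-- ===== VERDICT (by name: the statement is the Claim_ definition above) =====
theorem categorize_videos_spec : Claim_equal_categorize_videos := by
  intro videos _
  unfold Spec_categorize_videos categorize_videos categorize_videos_alt
  have h0 : (PySem.Dict.mk
      ([("hearings", []), ("markups", []), ("opening_statements", []), ("press_conferences", []),
        ("field_hearings", []), ("member_days", []), ("roundtables", []), ("other", [])] :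
        List (String × List (List (String × String)))))
      = PySem.Dict.mk (pvOrder.map (fun c => (c, (fun _ => ([] : List (List (String × String)))) c))) := by
    simp [pvOrder]
  rw [h0, pvFold_inv videos (fun _ => [])]
  simp
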